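-- pv_equiv track=rewrite | github.com/marek-guran/school-python | Programovanie 1 (cvičenia)/Vysledky na cvicenia/Matica_obvod.py | matica_obvod
-- ===== SOURCE A (Python) =====
-- def matica_obvod(m):
--     b=[]
--     for i in range(len(m)):
--         temp=[]
--         for j in range(len(m[i])):
--             if i==0 or i==len(m)-1 or j==0 or j==len(m[i])-1:
--                 temp.append(m[i][j])
--             else:
--                 temp.append(0)
--         b.append(temp)
--     return b
-- ===== SOURCE B (Python) =====
-- def matica_obvod(m):
--     if not m:
--         return []
--     if len(m) == 1:
--         return [list(m[0])]
--     mid = []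
--     for row in m[1:-1]:
--         r = [0] * len(row)
--         if row:
--             r[0] = row[0]
--             r[-1] = row[-1]
--         mid.append(r)
--     return [list(m[0])] + mid + [list(m[-1])]
-- ===== Notes on version B (the rewrite author's own statement) =====
-- stated objective: alternative
-- what changed: Replaces the single per-cell index loop with a structural decomposition: first and last rows copied whole, each interior row built as a zero row with its two endpoints overwritten.
import Mathlib
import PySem

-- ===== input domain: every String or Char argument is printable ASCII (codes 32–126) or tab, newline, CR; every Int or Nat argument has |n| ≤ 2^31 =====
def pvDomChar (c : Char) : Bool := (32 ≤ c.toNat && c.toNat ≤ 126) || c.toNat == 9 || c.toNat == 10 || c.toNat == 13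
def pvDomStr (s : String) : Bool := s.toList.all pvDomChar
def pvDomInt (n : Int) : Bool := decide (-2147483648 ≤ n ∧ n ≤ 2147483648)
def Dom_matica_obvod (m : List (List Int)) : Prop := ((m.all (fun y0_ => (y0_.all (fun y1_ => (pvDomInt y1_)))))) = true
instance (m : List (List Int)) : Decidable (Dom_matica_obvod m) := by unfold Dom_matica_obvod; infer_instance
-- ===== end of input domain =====

-- B rebuilds the matrix structurally (whole first/last rows; each interior row as a zero row with its
-- endpoints overwritten) instead of A's per-cell index/conditional loop; same cost, different decomposition.

-- ===== PORT A =====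
-- literal port of A: for i in range(len(m)): for j in range(len(m[i])): append cell or 0; append row
def matica_obvod (m : List (List Int)) : List (List Int) :=
  (PySem.List.pyRange 0 m.length 1).foldl
    (fun b i =>
      let row := PySem.List.pyGetD m i []
      let temp := (PySem.List.pyRange 0 row.length 1).foldl
        (fun temp j =>
          temp ++ [if i = 0 ∨ i = (m.length : Int) - 1 ∨ j = 0 ∨ j = (row.length : Int) - 1
                   then PySem.List.pyGetD row j 0 else 0]) []
      b ++ [temp]) []

-- ===== PORT B =====
-- interior row of B: r = [0]*len(row); if row: r[0] = row[0]; r[-1] = row[-1]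
def pvAltRow (row : List Int) : List Int :=
  let r := List.replicate row.length (0 : Int)
  if row.isEmpty then r
  else (r.set 0 (row.headD 0)).set (row.length - 1) (row.getLastD 0)

def matica_obvod_alt (m : List (List Int)) : List (List Int) :=
  match m with
  | [] => []
  | [r] => [r]
  | r0 :: rest =>
      -- m[1:-1] = rest.dropLast; m[-1] = rest's last element
      ([r0] ++ rest.dropLast.map pvAltRow) ++ [rest.getLastD []]

-- ===== PRECONDITION & SPEC =====
def Spec_matica_obvod (m : List (List Int)) (out : List (List Int)) : Prop := out = matica_obvod_alt m
instance (m : List (List Int)) (out : List (List Int)) : Decidable (Spec_matica_obvod m out) := by unfold Spec_matica_obvod; infer_instance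

-- ===== CLAIM (what is proved, stated in full; the proofs are below) =====
def Claim_equal_matica_obvod : Prop := ∀ (m : List (List Int)), Dom_matica_obvod m → Spec_matica_obvod m (matica_obvod m)

-- ===== LEMMAS AND PROOFS =====

-- A's inner loop, as a map over Nat column indices of a fixed row ('border' abstracts the row condition)
def pvRowA (border : Prop) [Decidable border] (row : List Int) : List Int :=
  (List.range row.length).map
    (fun j => if border ∨ j = 0 ∨ j = row.length - 1 then row.getD j 0 else 0)

lemma pvRowA_border (b : Prop) [Decidable b] (hb : b) (row : List Int) : pvRowA b row = row := by
  unfold pvRowA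
  have hc : ∀ j : Nat, (if b ∨ j = 0 ∨ j = row.length - 1 then row.getD j 0 else 0) = row.getD j 0 :=
    fun j => if_pos (Or.inl hb)
  simp only [hc]
  apply List.ext_getElem (by simp)
  intro i h1 h2
  simp [List.getD_eq_getElem?_getD, List.getElem?_eq_getElem h2]

lemma pvRowA_interior (b : Prop) [Decidable b] (hb : ¬ b) (row : List Int) :
    pvRowA b row = pvAltRow row := by
  unfold pvRowA pvAltRow
  have hbf : b ↔ False := iff_false_intro hb
  cases row with
  | nil => simp
  | cons x xs =>
    simp only [List.isEmpty_cons, if_neg Bool.false_ne_true, hbf, false_or]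
    apply List.ext_getElem (by simp)
    intro i h1 h2
    simp only [List.length_map, List.length_range, List.length_cons] at h1
    simp only [List.getElem_map, List.getElem_range, List.length_cons, Nat.add_sub_cancel]
    rw [List.getElem_set, List.getElem_set]
    by_cases hlast : xs.length = i
    · rw [if_pos hlast, if_pos (by omega)]
      subst hlast
      simp [List.getLastD_eq_getLast?, List.getLast?_eq_getElem?, List.getD_eq_getElem?_getD]
    · rw [if_neg hlast]
      by_cases h0 : (0 : Nat) = i
      · rw [if_pos h0, if_pos (by omega)]
        subst h0
        simp [List.getD_eq_getElem?_getD]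
      · rw [if_neg h0, if_neg (by omega)]
        simp [List.getElem_replicate]

-- A as a map over Nat row indices
lemma matica_obvod_eq_map (m : List (List Int)) :
    matica_obvod m =
      (List.range m.length).map
        (fun i => pvRowA (i = 0 ∨ i = m.length - 1) (m.getD i [])) := by
  unfold matica_obvod
  rw [PySem.List.foldl_append_singleton_eq_map]
  rw [PySem.List.pyRange_zero_nat, List.map_map]
  apply List.map_congr_left
  intro i hi
  simp only [Function.comp_apply, PySem.List.pyGetD_natCast]
  rw [PySem.List.foldl_append_singleton_eq_map, PySem.List.pyRange_zero_nat, List.map_map]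
  unfold pvRowA
  apply List.map_congr_left
  intro j hj
  simp only [List.mem_range] at hi hj
  have hiff : ((i : Int) = 0 ∨ (i : Int) = (m.length : Int) - 1 ∨ (j : Int) = 0 ∨
      (j : Int) = ((m.getD i []).length : Int) - 1) ↔
      ((i = 0 ∨ i = m.length - 1) ∨ j = 0 ∨ j = (m.getD i []).length - 1) := by
    constructor <;> (intro h; rcases h with h | h | h | h) <;> omega
  simp only [Function.comp_apply, PySem.List.pyGetD_natCast, hiff]

-- ===== VERDICT (by name: the statement is the Claim_ definition above) =====
theorem matica_obvod_spec : Claim_equal_matica_obvod := by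
  intro m _
  unfold Spec_matica_obvod
  rw [matica_obvod_eq_map]
  match m with
  | [] => simp [matica_obvod_alt]
  | [r] =>
      simp only [matica_obvod_alt, List.length_singleton, List.range_one, List.map_singleton]
      rw [pvRowA_border (True ∨ True) (Or.inl trivial)]
      simp
  | r0 :: r1 :: rest =>
      rcases List.eq_nil_or_concat (r1 :: rest) with hyz | ⟨ys, z, hyz⟩
      · simp at hyz
      rw [List.concat_eq_append] at hyz
      simp only [matica_obvod_alt, hyz]
      have hlen : (r0 :: (ys ++ [z])).length = ys.length + 2 := by simp
      rw [hlen]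
      rw [List.range_succ_eq_map, List.map_cons, List.map_map, List.range_succ,
        List.map_append]
      congr 1
      · rw [pvRowA_border _ (Or.inl rfl)]
        simp
      congr 1
      · rw [List.dropLast_concat]
        apply List.ext_getElem (by simp)
        intro i h1 h2
        simp only [List.length_map, List.length_range] at h1
        simp only [List.getElem_map, List.getElem_range, Function.comp_apply]
        have hg : (r0 :: (ys ++ [z])).getD (i + 1) [] = ys[i] := by
          simp [List.getD_eq_getElem?_getD, List.getElem?_append_left (by omega),
            List.getElem?_eq_getElem h1]
        rw [hg, pvRowA_interior _ (by omega)]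
        simp
      · simp only [List.map_singleton, Function.comp_apply]
        rw [pvRowA_border _ (by omega)]
        have hg : (r0 :: (ys ++ [z])).getD (ys.length + 1) [] = z := by
          simp [List.getD_eq_getElem?_getD]
        rw [hg]
        simp
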